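-- pv_equiv track=rewrite | github.com/harutois/ConsistASR | ConsistASR/iqtree_pipeline/indel_aware/map_raxml_to_iqtree_nodes.py | tokenize_newick
-- ===== SOURCE A (Python) =====
-- def tokenize_newick(s):
--     tokens = []
--     buf = []
--     for ch in s.strip():
--         if ch in '(),:;':
--             if buf:
--                 tokens.append(''.join(buf))
--                 buf = []
--             tokens.append(ch)
--         elif ch.isspace():
--             if buf:
--                 tokens.append(''.join(buf))
--                 buf = []
--         else:
--             buf.append(ch)
--     if buf:
--         tokens.append(''.join(buf))
--     return tokens
-- ===== SOURCE B (Python) =====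
-- def tokenize_newick(s):
--     # index-based scanner: emit delimiters, skip whitespace, slice maximal word runs
--     t = s.strip()
--     delims = '(),:;'
--     tokens = []
--     i, n = 0, len(t)
--     while i < n:
--         c = t[i]
--         if c in delims:
--             tokens.append(c)
--             i += 1
--         elif c.isspace():
--             i += 1
--         else:
--             j = i + 1
--             while j < n and t[j] not in delims and not t[j].isspace():
--                 j += 1
--             tokens.append(t[i:j])
--             i = j
--     return tokens
-- ===== Notes on version B (the rewrite author's own statement) =====
-- stated objective: alternative
-- what changed: Replaces A's char-by-char fold with a mutable buffer and flush-on-delimiter/space logic by an index-based scanner that emits delimiters directly and slices each maximal word run in one step, with no buffer state.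
import Mathlib
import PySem

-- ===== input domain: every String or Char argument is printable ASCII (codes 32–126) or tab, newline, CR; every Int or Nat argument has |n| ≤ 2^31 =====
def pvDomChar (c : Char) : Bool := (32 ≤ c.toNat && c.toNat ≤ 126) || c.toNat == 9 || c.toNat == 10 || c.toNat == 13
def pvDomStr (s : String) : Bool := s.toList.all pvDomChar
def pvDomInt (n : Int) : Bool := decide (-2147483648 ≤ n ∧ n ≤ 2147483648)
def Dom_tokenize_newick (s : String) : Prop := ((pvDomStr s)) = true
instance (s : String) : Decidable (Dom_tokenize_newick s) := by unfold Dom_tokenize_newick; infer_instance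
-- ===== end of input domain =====

-- B replaces A's buffer-flushing character fold by an index/run scanner that slices
-- maximal word runs directly (alternative decomposition, same O(n) cost).


-- ch in '(),:;'
def pvDelim (c : Char) : Bool := c = '(' || c = ')' || c = ',' || c = ':' || c = ';'

-- ch.isspace(): exact on Dom's character set (printable ASCII plus tab/newline/CR)
def pvSpace (c : Char) : Bool := c = ' ' || c = '\t' || c = '\n' || c = '\r'

-- ===== PORT A =====
-- one iteration of A's for-loop; state = (tokens, buf)
def pvLoopA (st : List String × List Char) (ch : Char) : List String × List Char :=
  if pvDelim ch then
    if st.2 = [] then (st.1 ++ [String.mk [ch]], [])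
    else (st.1 ++ [String.mk st.2] ++ [String.mk [ch]], [])
  else if pvSpace ch then
    if st.2 = [] then st
    else (st.1 ++ [String.mk st.2], [])
  else (st.1, st.2 ++ [ch])

def tokenize_newick (s : String) : List String :=
  let r := (PySem.Str.strip s).toList.foldl pvLoopA ([], [])
  if r.2 = [] then r.1 else r.1 ++ [String.mk r.2]

-- ===== PORT B =====
-- word character: neither a delimiter nor whitespace
def pvWord (c : Char) : Bool := !(pvDelim c || pvSpace c)

-- B's scanner: emit a delimiter, skip a space, or slice the maximal word run
def pvScanB : List Char → List String
  | [] => []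
  | c :: rest =>
    if pvDelim c then String.mk [c] :: pvScanB rest
    else if pvSpace c then pvScanB rest
    else String.mk (c :: rest.takeWhile pvWord) :: pvScanB (rest.dropWhile pvWord)
termination_by l => l.length
decreasing_by
  all_goals simp
  exact List.length_dropWhile_le pvWord rest

def tokenize_newick_alt (s : String) : List String := pvScanB (PySem.Str.strip s).toList

-- ===== PRECONDITION & SPEC =====
def Spec_tokenize_newick (s : String) (out : List String) : Prop := out = tokenize_newick_alt s
instance (s : String) (out : List String) : Decidable (Spec_tokenize_newick s out) := by unfold Spec_tokenize_newick; infer_instance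

-- ===== CLAIM (what is proved, stated in full; the proofs are below) =====
def Claim_equal_tokenize_newick : Prop := ∀ (s : String), Dom_tokenize_newick s → Spec_tokenize_newick s (tokenize_newick s)

-- ===== LEMMAS AND PROOFS =====

-- unfolding equations for pvScanB (well-founded recursion, so not definitional)
theorem pvScanB_nil : pvScanB [] = [] := by rw [pvScanB]
theorem pvScanB_cons (c : Char) (rest : List Char) :
    pvScanB (c :: rest) =
      (if pvDelim c then String.mk [c] :: pvScanB rest
       else if pvSpace c then pvScanB rest
       else String.mk (c :: rest.takeWhile pvWord) :: pvScanB (rest.dropWhile pvWord)) := by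
  rw [pvScanB]

-- the tokens component of A's loop state is only ever appended to
-- one step of A's loop only appends to the tokens component
theorem pvStep (tokens : List String) (buf : List Char) (c : Char) :
    pvLoopA (tokens, buf) c = (tokens ++ (pvLoopA ([], buf) c).1, (pvLoopA ([], buf) c).2) := by
  unfold pvLoopA; split_ifs <;> simp

-- the tokens component of A's loop state is only ever appended to
theorem pvLoopA_prefix (l : List Char) (tokens : List String) (buf : List Char) :
    l.foldl pvLoopA (tokens, buf) =
      (tokens ++ (l.foldl pvLoopA ([], buf)).1, (l.foldl pvLoopA ([], buf)).2) := by
  induction l generalizing tokens buf with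
  | nil => simp
  | cons c rest ih =>
    simp only [List.foldl_cons, pvStep tokens buf c]
    rw [ih, show pvLoopA ([], buf) c = ((pvLoopA ([], buf) c).1, (pvLoopA ([], buf) c).2) from rfl,
      ih (pvLoopA ([], buf) c).1]
    simp

-- flush the final buffer
def pvFinish (st : List String × List Char) : List String :=
  if st.2 = [] then st.1 else st.1 ++ [String.mk st.2]

theorem pvMain (l : List Char) (buf : List Char) :
    pvFinish (l.foldl pvLoopA ([], buf)) =
      (if buf = [] then pvScanB l
       else String.mk (buf ++ l.takeWhile pvWord) :: pvScanB (l.dropWhile pvWord)) := by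
  induction l generalizing buf with
  | nil => by_cases hb : buf = [] <;> simp [hb, pvFinish, pvScanB_nil]
  | cons c rest ih =>
    have hpre : ∀ (t : List String) (b : List Char),
        pvFinish (rest.foldl pvLoopA (t, b)) = t ++ pvFinish (rest.foldl pvLoopA ([], b)) := by
      intro t b
      rw [pvLoopA_prefix rest t b]
      by_cases h : (rest.foldl pvLoopA ([], b)).2 = [] <;> simp [pvFinish, h]
    by_cases hd : pvDelim c = true
    · have hw : pvWord c = false := by simp [pvWord, hd]
      by_cases hb : buf = []
      · rw [List.foldl_cons, show pvLoopA ([], buf) c = ([String.mk [c]], []) by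
          simp [pvLoopA, hd, hb], hpre, ih []]
        simp [pvScanB_cons, hd, hb]
      · rw [List.foldl_cons, show pvLoopA ([], buf) c = ([String.mk buf, String.mk [c]], []) by
          simp [pvLoopA, hd, hb], hpre, ih []]
        simp [pvScanB_cons, hd, hb, List.takeWhile_cons, List.dropWhile_cons, hw]
    · by_cases hs : pvSpace c = true
      · have hw : pvWord c = false := by simp [pvWord, hs]
        by_cases hb : buf = []
        · rw [List.foldl_cons, show pvLoopA ([], buf) c = ([], []) by
            simp [pvLoopA, hd, hs, hb], ih []]
          simp [pvScanB_cons, hd, hs, hb]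
        · rw [List.foldl_cons, show pvLoopA ([], buf) c = ([String.mk buf], []) by
            simp [pvLoopA, hd, hs, hb], hpre, ih []]
          simp [pvScanB_cons, hd, hs, hb, List.takeWhile_cons, List.dropWhile_cons, hw]
      · have hw : pvWord c = true := by simp [pvWord, hd, hs]
        by_cases hb : buf = []
        · rw [List.foldl_cons, show pvLoopA ([], buf) c = ([], [c]) by
            simp [pvLoopA, hd, hs, hb], ih [c]]
          simp [pvScanB_cons, hd, hs, hb, List.takeWhile_cons, List.dropWhile_cons, hw]
        · rw [List.foldl_cons, show pvLoopA ([], buf) c = ([], buf ++ [c]) by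
            simp [pvLoopA, hd, hs, hb], ih (buf ++ [c])]
          simp [List.takeWhile_cons, List.dropWhile_cons, hw, hb]

-- ===== VERDICT (by name: the statement is the Claim_ definition above) =====
theorem tokenize_newick_spec : Claim_equal_tokenize_newick := by
  intro s _
  show tokenize_newick s = tokenize_newick_alt s
  have h : pvFinish ((PySem.Str.strip s).toList.foldl pvLoopA ([], [])) =
      pvScanB (PySem.Str.strip s).toList := by
    simpa using pvMain (PySem.Str.strip s).toList []
  exact h
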